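-- pv_equiv track=rewrite | github.com/CSCfi/Kielipankki-utilities | corp/dma/dma-tsv2vrt.py | _make_word_types
-- ===== SOURCE A (Python) =====
-- def _make_word_types(text):
--     word_types = []
--     comment = False
--     for word in text.split():
--         if word == '[':
--             comment = True
--         word_types.append('comment' if comment else 'informant')
--         if word == ']':
--             comment = False
--     return ' '.join(word_types)
-- ===== SOURCE B (Python) =====
-- def _make_word_types(text):
--     words = text.split()
--     out = []
--     i = 0
--     n = len(words)
--     while i < n:
--         if words[i] == '[':
--             # comment region: mark up to and including the closing ']'
--             while i < n and words[i] != ']':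
--                 out.append('comment')
--                 i += 1
--             if i < n:
--                 out.append('comment')
--                 i += 1
--         else:
--             out.append('informant')
--             i += 1
--     return ' '.join(out)
-- ===== Notes on version B (the rewrite author's own statement) =====
-- stated objective: alternative
-- what changed: B scans bracket-delimited comment regions with a nested loop over word indices instead of threading a per-word running boolean flag through a single pass.
import Mathlib
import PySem

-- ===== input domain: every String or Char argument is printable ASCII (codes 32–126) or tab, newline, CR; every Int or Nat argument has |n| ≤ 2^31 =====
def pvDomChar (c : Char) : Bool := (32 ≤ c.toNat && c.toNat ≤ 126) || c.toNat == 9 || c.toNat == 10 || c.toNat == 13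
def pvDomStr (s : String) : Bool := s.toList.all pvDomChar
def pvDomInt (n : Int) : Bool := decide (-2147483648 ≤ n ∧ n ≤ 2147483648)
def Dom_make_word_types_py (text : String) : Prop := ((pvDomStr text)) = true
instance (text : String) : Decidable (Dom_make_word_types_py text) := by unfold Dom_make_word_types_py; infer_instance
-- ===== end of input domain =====

-- B replaces A's per-word running boolean with a nested scan over bracket-delimited
-- comment regions (objective: alternative decomposition, same cost).

-- ===== PORT A =====
def stepA (st : List String × Bool) (word : String) : List String × Bool :=
  let comment := if word == "[" then true else st.2
  let word_types := st.1 ++ [if comment then "comment" else "informant"]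
  let comment := if word == "]" then false else comment
  (word_types, comment)

def make_word_types_py (text : String) : String :=
  let st := (PySem.Str.split₀ text).foldl stepA ([], false)
  PySem.Str.join " " st.1

-- ===== PORT B =====
-- B's outer while loop over the remaining suffix of words; entering a region at '['
-- marks the '[' itself 'comment' (the inner loop's first step) and continues in bAltComment.
mutual
def bAltOuter : List String → List String
  | [] => []
  | w :: ws => if w == "[" then "comment" :: bAltComment ws else "informant" :: bAltOuter ws
-- the inner while loop: mark 'comment' until and including the closing ']'
def bAltComment : List String → List String
  | [] => []
  | w :: ws => if w == "]" then "comment" :: bAltOuter ws else "comment" :: bAltComment ws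
end

def make_word_types_py_alt (text : String) : String :=
  PySem.Str.join " " (bAltOuter (PySem.Str.split₀ text))

-- ===== PRECONDITION & SPEC =====
def Spec_make_word_types_py (text : String) (out : String) : Prop := out = make_word_types_py_alt text
instance (text : String) (out : String) : Decidable (Spec_make_word_types_py text out) := by unfold Spec_make_word_types_py; infer_instance

-- ===== CLAIM (what is proved, stated in full; the proofs are below) =====
def Claim_equal_make_word_types_py : Prop := ∀ (text : String), Dom_make_word_types_py text → Spec_make_word_types_py text (make_word_types_py text)

-- ===== LEMMAS AND PROOFS =====
lemma stepA_eval (st : List String × Bool) (word : String) :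
    stepA st word = (st.1 ++ [if (word == "[" || st.2) then "comment" else "informant"],
      if word == "]" then false else (word == "[" || st.2)) := by
  unfold stepA
  by_cases h1 : word == "[" <;> by_cases h2 : word == "]" <;> simp [h1, h2]

lemma foldA_eq (ws : List String) : ∀ (acc : List String) (c : Bool),
    (ws.foldl stepA (acc, c)).1 = acc ++ (if c then bAltComment ws else bAltOuter ws) := by
  induction ws with
  | nil => intro acc c; cases c <;> simp [bAltOuter, bAltComment]
  | cons w ws ih =>
    intro acc c
    rw [List.foldl_cons, stepA_eval]
    cases c with
    | false =>
      by_cases h1 : w == "["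
      · have h2 : (w == "]") = false := by
          cases hb : w == "]"
          · rfl
          · exact absurd (by rw [eq_of_beq hb] at h1; exact eq_of_beq h1) (by decide)
        rw [show (if w == "]" then false else (w == "[" || false)) = true by simp [h1, h2]]
        rw [ih]
        simp [bAltOuter, eq_of_beq h1]
      · by_cases h2 : w == "]"
        · rw [show (if w == "]" then false else (w == "[" || false)) = false by simp [h2]]
          rw [ih]
          simp [bAltOuter, h1]
        · rw [show (if w == "]" then false else (w == "[" || false)) = false by simp [h1, h2]]
          rw [ih]
          have h1' : w ≠ "[" := fun h => h1 (beq_iff_eq.mpr h)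
          simp [bAltOuter, h1]
    | true =>
      by_cases h2 : w == "]"
      · rw [show (if w == "]" then false else (w == "[" || true)) = false by simp [h2]]
        rw [ih]
        simp [bAltComment, eq_of_beq h2]
      · rw [show (if w == "]" then false else (w == "[" || true)) = true by simp [h2]]
        rw [ih]
        have h2' : w ≠ "]" := fun h => h2 (beq_iff_eq.mpr h)
        simp [bAltComment, h2']

-- ===== VERDICT (by name: the statement is the Claim_ definition above) =====
theorem make_word_types_py_spec : Claim_equal_make_word_types_py := by
  intro text _
  unfold Spec_make_word_types_py make_word_types_py make_word_types_py_alt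
  show PySem.Str.join " " (List.foldl stepA ([], false) (PySem.Str.split₀ text)).1 = _
  rw [foldA_eq]
  simp
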